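-- pv_equiv track=rewrite | github.com/fmwalle/Data_Stracture_excersise | industry/BackTracking/passwordGenerator.py | generateAllHumanFriendlyPasswords
-- ===== SOURCE A (Python) =====
-- def generateAllHumanFriendlyPasswords(words: list[str], maxLength: int) -> list[str]:
--     result=[]
--     def backTrack(subStrings,currentLength):
--        if currentLength<=maxLength and subStrings:
--           result.append(' '.join(subStrings[:]))
--        if currentLength==maxLength:
--           return
--
--        for word in words:
--           newlength=currentLength+len(word)+1 if subStrings else 0
--           if newlength<=maxLength and word not in subStrings:
--            subStrings.append(word)
--            backTrack(subStrings,newlength)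
--            subStrings.pop()
--     backTrack([],0)
--
--     return result
-- ===== SOURCE B (Python) =====
-- def generateAllHumanFriendlyPasswords(words: list[str], maxLength: int) -> list[str]:
--     result = []
--     stack = [([], 0)]
--     while stack:
--         subStrings, currentLength = stack.pop()
--         if currentLength <= maxLength and subStrings:
--             result.append(' '.join(subStrings))
--         if currentLength == maxLength:
--             continue
--         children = []
--         for word in words:
--             newlength = currentLength + len(word) + 1 if subStrings else 0
--             if newlength <= maxLength and word not in subStrings:
--                 children.append((subStrings + [word], newlength))
--         stack.extend(reversed(children))
--     return result
-- ===== Notes on version B (the rewrite author's own statement) =====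
-- stated objective: alternative
-- what changed: Replaces the recursive backtracking with a shared mutable result (and append/pop on a shared subStrings list) by an iterative DFS over an explicit stack of (subStrings, currentLength) frames, pushing each frame's children in reversed order to keep the original preorder output.
import Mathlib
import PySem

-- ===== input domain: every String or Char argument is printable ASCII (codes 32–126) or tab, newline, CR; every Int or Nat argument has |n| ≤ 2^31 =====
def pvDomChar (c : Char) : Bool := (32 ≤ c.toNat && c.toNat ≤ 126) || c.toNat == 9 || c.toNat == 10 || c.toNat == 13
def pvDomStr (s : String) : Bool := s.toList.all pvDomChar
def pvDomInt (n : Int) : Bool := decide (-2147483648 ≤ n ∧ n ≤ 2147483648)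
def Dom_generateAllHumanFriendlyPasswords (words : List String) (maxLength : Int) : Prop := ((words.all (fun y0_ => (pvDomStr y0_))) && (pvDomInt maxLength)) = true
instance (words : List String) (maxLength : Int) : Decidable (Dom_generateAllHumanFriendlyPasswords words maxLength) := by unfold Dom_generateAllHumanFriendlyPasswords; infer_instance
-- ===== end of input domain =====

-- B replaces A's recursive backtracking (shared mutable result, append/pop on a shared list) by an
-- iterative DFS over an explicit stack of (subStrings, currentLength) frames; same preorder output,
-- alternative decomposition of the same cost.

-- ===== PORT A =====
-- Literal port of A's recursive backTrack: the shared 'result' accumulator is rendered as the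
-- returned list (emissions concatenated in call order), the for-loop as pvLoopA. 'fuel' is a
-- totality guard only (each recursive call appends a word of 'words' not yet in subStrings, so the
-- depth is at most words.length + 1 and the guard is never hit from the top-level call).
mutual
def pvBtA (words : List String) (maxLength : Int) : Nat → List String → Int → List String
  | 0, _, _ => []
  | fuel+1, subs, cur =>
    let emit := if cur ≤ maxLength ∧ subs ≠ [] then [PySem.Str.join " " subs] else []
    if cur = maxLength then emit
    else emit ++ pvLoopA words maxLength fuel subs cur words
termination_by fuel _ _ => (fuel, 0)
def pvLoopA (words : List String) (maxLength : Int) (fuel : Nat) (subs : List String) (cur : Int) : List String → List String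
  | [] => []
  | w :: rest =>
    let nl := if subs ≠ [] then cur + PySem.Str.len w + 1 else 0
    (if nl ≤ maxLength ∧ w ∉ subs then pvBtA words maxLength fuel (subs ++ [w]) nl else [])
      ++ pvLoopA words maxLength fuel subs cur rest
termination_by rem => (fuel, rem.length + 1)
end

def generateAllHumanFriendlyPasswords (words : List String) (maxLength : Int) : List String :=
  pvBtA words maxLength (words.length + 1) [] 0

-- ===== PORT B =====
-- Literal port of B's while-loop DFS. The list head models the top of Python's stack: Python pops
-- from the END and extends with reversed(children), which is exactly popping the HEAD here and
-- prepending 'children' in words order. 'fuel' is a totality guard only (the loop runs at most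
-- (words.length+1)^(words.length+1) iterations, so the guard is never hit from the top-level call).
def pvRunB (words : List String) (maxLength : Int) : Nat → List (List String × Int) → List String → List String
  | 0, _, res => res
  | _+1, [], res => res
  | fuel+1, (subs, cur) :: rest, res =>
    let res' := if cur ≤ maxLength ∧ subs ≠ [] then res ++ [PySem.Str.join " " subs] else res
    if cur = maxLength then pvRunB words maxLength fuel rest res'
    else
      let children := words.foldl (fun acc w =>
        let nl := if subs ≠ [] then cur + PySem.Str.len w + 1 else 0
        if nl ≤ maxLength ∧ w ∉ subs then acc ++ [(subs ++ [w], nl)] else acc) []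
      pvRunB words maxLength fuel (children ++ rest) res'

def generateAllHumanFriendlyPasswords_alt (words : List String) (maxLength : Int) : List String :=
  pvRunB words maxLength ((words.length + 1) ^ (words.length + 1)) [([], 0)] []

-- ===== PRECONDITION & SPEC =====
def Spec_generateAllHumanFriendlyPasswords (words : List String) (maxLength : Int) (out : List String) : Prop := out = generateAllHumanFriendlyPasswords_alt words maxLength
instance (words : List String) (maxLength : Int) (out : List String) : Decidable (Spec_generateAllHumanFriendlyPasswords words maxLength out) := by unfold Spec_generateAllHumanFriendlyPasswords; infer_instance

-- ===== CLAIM (what is proved, stated in full; the proofs are below) =====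
def Claim_equal_generateAllHumanFriendlyPasswords : Prop := ∀ (words : List String) (maxLength : Int), Dom_generateAllHumanFriendlyPasswords words maxLength → Spec_generateAllHumanFriendlyPasswords words maxLength (generateAllHumanFriendlyPasswords words maxLength)

-- ===== LEMMAS AND PROOFS =====

-- number of occurrences in 'words' of words not yet used: the recursion depth potential
def pvKK (words subs : List String) : Nat := (words.filter (fun x => decide (x ∉ subs))).length

-- the child frames a node (subs, cur) generates, scanning 'rem'
def pvChild (maxLength : Int) (subs : List String) (cur : Int) (rem : List String) : List (List String × Int) :=
  (rem.filter (fun w => decide ((if subs ≠ [] then cur + PySem.Str.len w + 1 else 0) ≤ maxLength ∧ w ∉ subs))).map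
    (fun w => (subs ++ [w], if subs ≠ [] then cur + PySem.Str.len w + 1 else 0))

-- canonical value of A's recursion at a node (fuel just above the needed depth)
def pvAV (words : List String) (maxLength : Int) (subs : List String) (cur : Int) : List String :=
  pvBtA words maxLength (pvKK words subs + 1) subs cur

-- potential of a stack: bounds the number of remaining loop iterations of B
def pvPhi (words : List String) (stack : List (List String × Int)) : Nat :=
  (stack.map (fun p => (words.length + 1) ^ pvKK words p.1)).sum

lemma pvKK_lt (words subs : List String) (w : String) (hw : w ∈ words) (hns : w ∉ subs) :
    pvKK words (subs ++ [w]) < pvKK words subs := by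
  unfold pvKK
  have hp : (fun x => decide (x ∉ subs ++ [w])) = (fun a => decide (a ≠ w) && decide (a ∉ subs)) := by
    funext a
    by_cases h1 : a ∈ subs <;> by_cases h2 : a = w <;> simp [h1, h2]
  rw [hp, ← List.filter_filter]
  exact List.length_filter_lt_length_iff_exists.mpr
    ⟨w, List.mem_filter.mpr ⟨hw, by simpa using hns⟩, by simp⟩

lemma pvLoopA_eq (words : List String) (maxLength : Int) (fuel : Nat) (subs : List String)
    (cur : Int) (rem : List String) :
    pvLoopA words maxLength fuel subs cur rem
      = (pvChild maxLength subs cur rem).flatMap (fun p => pvBtA words maxLength fuel p.1 p.2) := by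
  induction rem with
  | nil => simp [pvLoopA, pvChild]
  | cons w rest ih =>
    simp only [pvLoopA, pvChild, List.filter_cons]
    by_cases h : (if subs ≠ [] then cur + PySem.Str.len w + 1 else 0) ≤ maxLength ∧ w ∉ subs
    · simp only [h, decide_true]
      rw [ih]
      rfl
    · simp only [h, decide_false, if_neg Bool.false_ne_true, if_neg h, List.nil_append]
      rw [ih]
      rfl

lemma pvChild_mem (maxLength : Int) (subs : List String) (cur : Int) (rem : List String)
    (p : List String × Int) (hp : p ∈ pvChild maxLength subs cur rem) :
    ∃ w, w ∈ rem ∧ w ∉ subs ∧ p.1 = subs ++ [w] := by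
  simp only [pvChild, List.mem_map, List.mem_filter, decide_eq_true_eq] at hp
  obtain ⟨w, ⟨hw, _, hns⟩, hp⟩ := hp
  exact ⟨w, hw, hns, by rw [← hp]⟩

lemma pvBtA_fuel_congr (words : List String) (maxLength : Int) :
    ∀ fuel fuel' subs cur, pvKK words subs < fuel → pvKK words subs < fuel' →
      pvBtA words maxLength fuel subs cur = pvBtA words maxLength fuel' subs cur := by
  intro fuel
  induction fuel with
  | zero => intro fuel' subs cur h; omega
  | succ n ih =>
    intro fuel' subs cur h h'
    match fuel' with
    | 0 => omega
    | m + 1 =>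
      simp only [pvBtA]
      rw [pvLoopA_eq, pvLoopA_eq]
      have hcongr : ∀ p ∈ pvChild maxLength subs cur words,
          pvBtA words maxLength n p.1 p.2 = pvBtA words maxLength m p.1 p.2 := by
        intro p hp
        obtain ⟨w, hw, hns, hp1⟩ := pvChild_mem maxLength subs cur words p hp
        have hlt := pvKK_lt words subs w hw hns
        have hk : pvKK words p.1 < pvKK words subs := hp1 ▸ hlt
        exact ih m p.1 p.2 (by omega) (by omega)
      rw [List.flatMap_congr hcongr]

lemma pvAV_unfold (words : List String) (maxLength : Int) (subs : List String) (cur : Int) :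
    pvAV words maxLength subs cur
      = (if cur ≤ maxLength ∧ subs ≠ [] then [PySem.Str.join " " subs] else [])
        ++ (if cur = maxLength then []
            else (pvChild maxLength subs cur words).flatMap
              (fun p => pvAV words maxLength p.1 p.2)) := by
  unfold pvAV
  conv_lhs => rw [pvBtA]
  by_cases hc : cur = maxLength
  · simp [hc]
  · rw [if_neg hc, pvLoopA_eq]
    congr 1
    rw [if_neg hc]
    apply List.flatMap_congr
    intro p hp
    obtain ⟨w, hw, hns, hp1⟩ := pvChild_mem maxLength subs cur words p hp
    have hk : pvKK words p.1 < pvKK words subs := hp1 ▸ pvKK_lt words subs w hw hns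
    exact pvBtA_fuel_congr words maxLength _ _ p.1 p.2 hk (by omega)

lemma pvChildren_foldl (words : List String) (maxLength : Int) (subs : List String) (cur : Int) :
    words.foldl (fun acc w =>
        let nl := if subs ≠ [] then cur + PySem.Str.len w + 1 else 0
        if nl ≤ maxLength ∧ w ∉ subs then acc ++ [(subs ++ [w], nl)] else acc) []
      = pvChild maxLength subs cur words := by
  suffices h : ∀ (rem : List String) (acc : List (List String × Int)),
      rem.foldl (fun acc w =>
        let nl := if subs ≠ [] then cur + PySem.Str.len w + 1 else 0
        if nl ≤ maxLength ∧ w ∉ subs then acc ++ [(subs ++ [w], nl)] else acc) acc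
      = acc ++ pvChild maxLength subs cur rem by
    simpa using h words []
  intro rem
  induction rem with
  | nil => intro acc; simp [pvChild]
  | cons w rest ih =>
    intro acc
    simp only [List.foldl_cons, pvChild, List.filter_cons]
    by_cases h : (if subs ≠ [] then cur + PySem.Str.len w + 1 else 0) ≤ maxLength ∧ w ∉ subs
    · simp only [h, decide_true, ih]
      rw [pvChild]
      simp
    · simp only [h, decide_false, Bool.false_eq_true, if_false, ih]
      rw [pvChild]

lemma pvPhi_child (words : List String) (maxLength : Int) (subs : List String) (cur : Int) :
    pvPhi words (pvChild maxLength subs cur words) + 1 ≤ (words.length + 1) ^ pvKK words subs := by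
  by_cases hnil : pvChild maxLength subs cur words = []
  · rw [hnil]
    have := Nat.pow_pos (n := pvKK words subs) (show 0 < words.length + 1 by omega)
    simp [pvPhi]
    omega
  · have hk1 : 1 ≤ pvKK words subs := by
      obtain ⟨p, hp⟩ := List.exists_mem_of_ne_nil _ hnil
      obtain ⟨w, hw, hns, _⟩ := pvChild_mem maxLength subs cur words p hp
      have hmem : w ∈ words.filter (fun x => decide (x ∉ subs)) :=
        List.mem_filter.mpr ⟨hw, by simpa using hns⟩
      have := List.length_pos_of_mem hmem
      unfold pvKK
      omega
    have hbound : ∀ x ∈ (pvChild maxLength subs cur words).map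
        (fun p => (words.length + 1) ^ pvKK words p.1),
        x ≤ (words.length + 1) ^ (pvKK words subs - 1) := by
      intro x hx
      obtain ⟨p, hp, hx⟩ := List.mem_map.mp hx
      obtain ⟨w, hw, hns, hp1⟩ := pvChild_mem maxLength subs cur words p hp
      have hk : pvKK words p.1 < pvKK words subs := hp1 ▸ pvKK_lt words subs w hw hns
      rw [← hx]
      exact Nat.pow_le_pow_right (by omega) (by omega)
    have hsum := List.sum_le_card_nsmul _ _ hbound
    have hlen : (pvChild maxLength subs cur words).length ≤ words.length := by
      unfold pvChild
      rw [List.length_map]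
      exact List.length_filter_le _ _
    have hb : 1 ≤ (words.length + 1) ^ (pvKK words subs - 1) :=
      Nat.pow_pos (by omega)
    have hpow : (words.length + 1) ^ pvKK words subs
        = (words.length + 1) ^ (pvKK words subs - 1) * (words.length + 1) := by
      conv_lhs => rw [show pvKK words subs = pvKK words subs - 1 + 1 from by omega]
      rw [pow_succ]
    unfold pvPhi
    rw [hpow]
    simp only [smul_eq_mul, List.length_map] at hsum
    calc ((pvChild maxLength subs cur words).map
            (fun p => (words.length + 1) ^ pvKK words p.1)).sum + 1
        ≤ (pvChild maxLength subs cur words).length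
            * (words.length + 1) ^ (pvKK words subs - 1) + 1 := by omega
      _ ≤ words.length * (words.length + 1) ^ (pvKK words subs - 1)
            + (words.length + 1) ^ (pvKK words subs - 1) := by
          have := Nat.mul_le_mul_right ((words.length + 1) ^ (pvKK words subs - 1)) hlen
          omega
      _ = (words.length + 1) ^ (pvKK words subs - 1) * (words.length + 1) := by ring

lemma pvRunB_eq (words : List String) (maxLength : Int) :
    ∀ fuel stack res, pvPhi words stack ≤ fuel →
      pvRunB words maxLength fuel stack res
        = res ++ stack.flatMap (fun p => pvAV words maxLength p.1 p.2) := by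
  intro fuel
  induction fuel with
  | zero =>
    intro stack res h
    match stack with
    | [] => simp [pvRunB]
    | (subs, cur) :: rest =>
      exfalso
      simp [pvPhi] at h
  | succ n ih =>
    intro stack res h
    match stack with
    | [] => simp [pvRunB]
    | (subs, cur) :: rest =>
      have hphi : pvPhi words ((subs, cur) :: rest)
          = (words.length + 1) ^ pvKK words subs + pvPhi words rest := by
        simp [pvPhi]
      have hpow := Nat.pow_pos (n := pvKK words subs) (show 0 < words.length + 1 by omega)
      simp only [pvRunB, pvChildren_foldl]
      by_cases hc : cur = maxLength
      · rw [if_pos hc, ih rest _ (by omega)]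
        rw [List.flatMap_cons, pvAV_unfold, if_pos hc]
        by_cases he : cur ≤ maxLength ∧ subs ≠ [] <;> simp [he]
      · have hch := pvPhi_child words maxLength subs cur
        have hphi2 : pvPhi words (pvChild maxLength subs cur words ++ rest)
            = pvPhi words (pvChild maxLength subs cur words) + pvPhi words rest := by
          simp [pvPhi]
        rw [if_neg hc, ih _ _ (by omega)]
        rw [List.flatMap_cons, List.flatMap_append, pvAV_unfold, if_neg hc]
        by_cases he : cur ≤ maxLength ∧ subs ≠ [] <;> simp [he]

-- ===== VERDICT (by name: the statement is the Claim_ definition above) =====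
theorem generateAllHumanFriendlyPasswords_spec : Claim_equal_generateAllHumanFriendlyPasswords := by
  intro words maxLength _
  unfold Spec_generateAllHumanFriendlyPasswords generateAllHumanFriendlyPasswords
    generateAllHumanFriendlyPasswords_alt
  have hkknil : pvKK words [] = words.length := by simp [pvKK]
  have hA : pvBtA words maxLength (words.length + 1) [] 0 = pvAV words maxLength [] 0 := by
    apply pvBtA_fuel_congr words maxLength _ _ _ _ (by omega) (by omega)
  have hB : pvRunB words maxLength ((words.length + 1) ^ (words.length + 1)) [([], 0)] []
      = pvAV words maxLength [] 0 := by
    rw [pvRunB_eq words maxLength _ _ _ (by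
      simp [pvPhi, hkknil]
      exact Nat.pow_le_pow_right (by omega) (by omega))]
    simp
  rw [hA, hB]
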